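-- pv_equiv track=rewrite | github.com/cobed95/learning-ps | search_for_sum_equal_multiple.py | search_without_asterisk
-- ===== SOURCE A (Python) =====
-- def search_without_asterisk(A, d):
--     sum_candidate = [0] * (len(A)+1)
--     for i in range(1, len(sum_candidate)):
--         sum_candidate[i] = A[i-1]
--     sum_lst = [0] * (len(sum_candidate))
--     for i in range(1, len(sum_lst)):
--         sum_lst[i] = sum_lst[i-1] + sum_candidate[i]
--     book = [0] * d
--     count = 0
--     for i in range(len(sum_lst)):
--         remainder = sum_lst[i]%d
--         if i != 0 and remainder == sum_lst[i-1]%d: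
--             count += book[remainder]-1
--         else:
--             count += book[remainder]
--         book[remainder] += 1
--     return count
-- ===== SOURCE B (Python) =====
-- def search_without_asterisk(A, d):
--     # One pass building a remainder-frequency table of the n+1 prefix sums,
--     # then the pair-count formula sum C(c,2) minus the count of elements divisible by d.
--     freq = [0] * d
--     freq[0 % d] += 1
--     pref = 0
--     elems_div = 0
--     for x in A:
--         pref += x
--         freq[pref % d] += 1
--         if x % d == 0:
--             elems_div += 1
--     total = 0
--     for c in freq:
--         total += c * (c - 1) // 2
--     return total - elems_div
-- ===== Notes on version B (the rewrite author's own statement) =====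
-- stated objective: alternative
-- what changed: A materialises two auxiliary arrays and counts pairs incrementally ('count += book[remainder]' with an inline -1 when consecutive prefix remainders coincide); B builds the remainder-frequency table of the prefix sums in one pass over A, then returns sum of c*(c-1)//2 over the table minus the count of elements divisible by d.
import Mathlib
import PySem

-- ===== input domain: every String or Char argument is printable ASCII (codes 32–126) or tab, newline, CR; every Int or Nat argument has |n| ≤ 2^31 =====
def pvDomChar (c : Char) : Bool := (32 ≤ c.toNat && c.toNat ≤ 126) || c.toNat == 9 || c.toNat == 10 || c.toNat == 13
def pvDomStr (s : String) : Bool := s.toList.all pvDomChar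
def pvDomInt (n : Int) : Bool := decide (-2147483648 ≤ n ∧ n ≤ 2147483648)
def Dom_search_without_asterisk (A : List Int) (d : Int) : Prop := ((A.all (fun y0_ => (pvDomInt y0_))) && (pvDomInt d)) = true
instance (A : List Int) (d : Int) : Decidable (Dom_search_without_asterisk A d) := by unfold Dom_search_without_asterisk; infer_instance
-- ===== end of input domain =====

-- B replaces A's incremental 'count += book[remainder] (- 1)' bookkeeping by a build-the-remainder-
-- frequency-table-then-sum-C(c,2) decomposition with a separate count of elements divisible by d
-- (objective: alternative decomposition, same O(n + d) cost).

-- ===== PORT A =====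
def pvA_sumCandidate (A : List Int) : List Int :=
  (PySem.List.pyRange 1 ((A.length : Int) + 1) 1).foldl
    (fun sc i => PySem.List.pySetD sc i (PySem.List.pyGetD A (i - 1) 0))
    (List.replicate (A.length + 1) (0 : Int))

def pvA_sumLst (A : List Int) : List Int :=
  let sc := pvA_sumCandidate A
  (PySem.List.pyRange 1 (sc.length : Int) 1).foldl
    (fun sl i => PySem.List.pySetD sl i (PySem.List.pyGetD sl (i - 1) 0 + PySem.List.pyGetD sc i 0))
    (List.replicate sc.length (0 : Int))

def pvA_step (d : Int) (L : List Int) (st : List Int × Int) (i : Int) : List Int × Int :=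
  let remainder := PySem.Int.mod (PySem.List.pyGetD L i 0) d
  let count := if i ≠ 0 ∧ remainder = PySem.Int.mod (PySem.List.pyGetD L (i - 1) 0) d
    then st.2 + (PySem.List.pyGetD st.1 remainder 0 - 1)
    else st.2 + PySem.List.pyGetD st.1 remainder 0
  (PySem.List.pySetD st.1 remainder (PySem.List.pyGetD st.1 remainder 0 + 1), count)

-- indexing into 'book' uses the total pyGetD/pySetD forms: under Pre_ (0 < d) every remainder
-- is in range, exactly as in the Python (d ≤ 0, where Python raises, is excluded by Pre_)
def search_without_asterisk (A : List Int) (d : Int) : Int :=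
  let sum_lst := pvA_sumLst A
  ((PySem.List.pyRange 0 (sum_lst.length : Int) 1).foldl (pvA_step d sum_lst)
    (List.replicate d.toNat (0 : Int), (0 : Int))).2

-- ===== PORT B =====
def pvB_step (d : Int) (st : Int × List Int × Int) (x : Int) : Int × List Int × Int :=
  let pref := st.1 + x
  let r := PySem.Int.mod pref d
  (pref,
   PySem.List.pySetD st.2.1 r (PySem.List.pyGetD st.2.1 r 0 + 1),
   if PySem.Int.mod x d = 0 then st.2.2 + 1 else st.2.2)

def search_without_asterisk_alt (A : List Int) (d : Int) : Int :=
  let freq0 := List.replicate d.toNat (0 : Int)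
  let r0 := PySem.Int.mod 0 d
  let freq1 := PySem.List.pySetD freq0 r0 (PySem.List.pyGetD freq0 r0 0 + 1)
  let st := A.foldl (pvB_step d) (0, freq1, 0)
  st.2.1.foldl (fun acc c => acc + PySem.Int.floordiv (c * (c - 1)) 2) 0 - st.2.2

-- ===== PRECONDITION & SPEC =====
-- Pre_: the Python A raises on every d ≤ 0 (ZeroDivisionError for d = 0; book = [] and
-- IndexError for d < 0); it returns normally exactly when 0 < d.
def Pre_search_without_asterisk (A : List Int) (d : Int) : Prop := 0 < d
instance (A : List Int) (d : Int) : Decidable (Pre_search_without_asterisk A d) := by unfold Pre_search_without_asterisk; infer_instance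
def pvWitness_search_without_asterisk : List Int × Int := ([3, -1, 4, 1, 5], 3)

def Spec_search_without_asterisk (A : List Int) (d : Int) (out : Int) : Prop := out = search_without_asterisk_alt A d
instance (A : List Int) (d : Int) (out : Int) : Decidable (Spec_search_without_asterisk A d out) := by unfold Spec_search_without_asterisk; infer_instance

-- ===== CLAIM (what is proved, stated in full; the proofs are below) =====
def Claim_equal_search_without_asterisk : Prop := ∀ (A : List Int) (d : Int), Dom_search_without_asterisk A d → Pre_search_without_asterisk A d → Spec_search_without_asterisk A d (search_without_asterisk A d)

-- ===== LEMMAS AND PROOFS =====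

-- proof-only helpers
def pvBump (l : List Int) (r : Int) : List Int :=
  PySem.List.pySetD l r (PySem.List.pyGetD l r 0 + 1)

def pvF (c : Int) : Int := PySem.Int.floordiv (c * (c - 1)) 2

def pvPairsum (l : List Int) : Int := (l.map pvF).sum

def pvPsums (p : Int) : List Int → List Int
  | [] => []
  | x :: xs => (p + x) :: pvPsums (p + x) xs

def pvAdjEq (d prev : Int) : List Int → Int
  | [] => 0
  | p :: ps => (if PySem.Int.mod p d = PySem.Int.mod prev d then 1 else 0) + pvAdjEq d p ps

def pvDivCnt (d : Int) : List Int → Int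
  | [] => 0
  | x :: xs => (if PySem.Int.mod x d = 0 then 1 else 0) + pvDivCnt d xs

def pvLoopA (d : Int) (prev : Int) (book : List Int) (count : Int) : List Int → Int
  | [] => count
  | p :: ps =>
    let r := PySem.Int.mod p d
    pvLoopA d p (pvBump book r)
      (if r = PySem.Int.mod prev d then count + (PySem.List.pyGetD book r 0 - 1)
       else count + PySem.List.pyGetD book r 0) ps

-- set that fills the next slot of a take-++-zeros buffer
lemma pv_set_take_replicate (L : List Int) (k m : Nat) (hk : k < L.length) :
    (L.take k ++ List.replicate (m + 1) (0 : Int)).set k (L.getD k 0) =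
      L.take (k + 1) ++ List.replicate m 0 := by
  induction k generalizing L with
  | zero =>
    cases L with
    | nil => simp at hk
    | cons a t => simp [List.replicate_succ]
  | succ k ih =>
    cases L with
    | nil => simp at hk
    | cons a t =>
      simp only [List.take_succ_cons, List.cons_append, List.set_cons_succ, List.getD_cons_succ]
      rw [ih t (by simpa using hk)]

lemma pv_getD_take_append (L : List Int) (k j : Nat) (rest : List Int)
    (hj : j < k) (hk : k ≤ L.length) :
    (L.take k ++ rest).getD j 0 = L.getD j 0 := by
  have h1 : j < (L.take k).length := by simp; omega
  rw [List.getD_append _ _ _ _ h1]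
  simp [List.getD, hj]

lemma pv_length_psums (p : Int) (A : List Int) : (pvPsums p A).length = A.length := by
  induction A generalizing p with
  | nil => rfl
  | cons x xs ih => simp [pvPsums, ih]

lemma pv_psums_rec (p : Int) (A : List Int) : ∀ (k : Nat), k < A.length →
    (p :: pvPsums p A).getD (k + 1) 0 = (p :: pvPsums p A).getD k 0 + A.getD k 0 := by
  induction A generalizing p with
  | nil => intro k hk; simp at hk
  | cons x xs ih =>
    intro k hk
    cases k with
    | zero => simp [pvPsums]
    | succ k =>
      have := ih (p + x) k (by simpa using hk)
      simpa [pvPsums] using this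

lemma pv_fillA (A : List Int) :
    ∀ (m k : Nat), A.length - k = m → k ≤ A.length →
    (PySem.List.pyRange ((k : Int) + 1) ((A.length : Int) + 1) 1).foldl
      (fun sc i => PySem.List.pySetD sc i (PySem.List.pyGetD A (i - 1) 0))
      ((0 :: A).take (k + 1) ++ List.replicate (A.length - k) (0 : Int)) = 0 :: A := by
  intro m
  induction m with
  | zero =>
    intro k hm hk
    rw [PySem.List.pyRange_one_eq_nil (by omega)]
    have hke : k = A.length := by omega
    subst hke
    simp [List.take_of_length_le]
  | succ m ih =>
    intro k hm hk
    have hkl : k < A.length := by omega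
    rw [PySem.List.pyRange_one_cons (by omega)]
    simp only [List.foldl_cons]
    have hstate : PySem.List.pySetD ((0 :: A).take (k + 1) ++ List.replicate (A.length - k) (0:Int))
        ((k : Int) + 1) (PySem.List.pyGetD A ((k : Int) + 1 - 1) 0)
        = (0 :: A).take (k + 1 + 1) ++ List.replicate (A.length - (k + 1)) 0 := by
      rw [show ((k : Int) + 1 - 1) = (k : Int) by ring, PySem.List.pyGetD_natCast,
        show ((k : Int) + 1) = ((k + 1 : Nat) : Int) by omega, PySem.List.pySetD_natCast]
      rw [show A.length - k = (A.length - (k + 1)) + 1 by omega]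
      have h := pv_set_take_replicate (0 :: A) (k + 1) (A.length - (k + 1)) (by simp; omega)
      rw [show (0 :: A).getD (k + 1) 0 = A.getD k 0 by simp] at h
      exact h
    rw [hstate, show ((k : Int) + 1 + 1) = ((k + 1 : Nat) : Int) + 1 by omega,
      ih (k + 1) (by omega) (by omega)]

-- sum_candidate = [0] + A
lemma pvA_sumCandidate_eq (A : List Int) : pvA_sumCandidate A = 0 :: A := by
  have h := pv_fillA A A.length 0 (by omega) (by omega)
  simpa [pvA_sumCandidate, List.replicate_succ] using h

lemma pv_fillL (A : List Int) :
    ∀ (m k : Nat), A.length - k = m → k ≤ A.length →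
    (PySem.List.pyRange ((k : Int) + 1) ((A.length : Int) + 1) 1).foldl
      (fun sl i => PySem.List.pySetD sl i
        (PySem.List.pyGetD sl (i - 1) 0 + PySem.List.pyGetD (0 :: A) i 0))
      ((0 :: pvPsums 0 A).take (k + 1) ++ List.replicate (A.length - k) (0 : Int))
      = 0 :: pvPsums 0 A := by
  intro m
  induction m with
  | zero =>
    intro k hm hk
    rw [PySem.List.pyRange_one_eq_nil (by omega)]
    have hke : k = A.length := by omega
    subst hke
    simp [List.take_of_length_le, pv_length_psums]
  | succ m ih =>
    intro k hm hk
    have hkl : k < A.length := by omega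
    rw [PySem.List.pyRange_one_cons (by omega)]
    simp only [List.foldl_cons]
    have hstate : PySem.List.pySetD
        ((0 :: pvPsums 0 A).take (k + 1) ++ List.replicate (A.length - k) (0:Int))
        ((k : Int) + 1)
        (PySem.List.pyGetD ((0 :: pvPsums 0 A).take (k + 1) ++ List.replicate (A.length - k) (0:Int)) ((k : Int) + 1 - 1) 0
          + PySem.List.pyGetD (0 :: A) ((k : Int) + 1) 0)
        = (0 :: pvPsums 0 A).take (k + 1 + 1) ++ List.replicate (A.length - (k + 1)) 0 := by
      rw [show ((k : Int) + 1 - 1) = (k : Int) by ring, PySem.List.pyGetD_natCast,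
        show ((k : Int) + 1) = ((k + 1 : Nat) : Int) by omega, PySem.List.pyGetD_natCast,
        PySem.List.pySetD_natCast]
      rw [pv_getD_take_append _ (k + 1) k _ (by omega) (by simp [pv_length_psums]; omega)]
      rw [show ((0 :: A).getD (k + 1) 0) = A.getD k 0 by simp]
      rw [← pv_psums_rec 0 A k hkl]
      rw [show A.length - k = (A.length - (k + 1)) + 1 by omega]
      exact pv_set_take_replicate (0 :: pvPsums 0 A) (k + 1) (A.length - (k + 1))
        (by simp [pv_length_psums]; omega)
    rw [hstate, show ((k : Int) + 1 + 1) = ((k + 1 : Nat) : Int) + 1 by omega,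
      ih (k + 1) (by omega) (by omega)]

-- sum_lst = prefix sums
lemma pvA_sumLst_eq (A : List Int) : pvA_sumLst A = 0 :: pvPsums 0 A := by
  have h := pv_fillL A A.length 0 (by omega) (by omega)
  simp only [Nat.cast_zero, zero_add, List.take_succ_cons, List.take_zero, Nat.sub_zero,
    List.cons_append, List.nil_append] at h
  simpa [pvA_sumLst, pvA_sumCandidate_eq, List.replicate_succ, Nat.cast_add, Nat.cast_one] using h

-- main loop of A, indices ≥ 1, as a loop over the suffix of sum_lst
lemma pv_fold_eq_loopA (d : Int) (L : List Int) (a : Nat) (ha : 1 ≤ a) (book : List Int) (count : Int) :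
    ((PySem.List.pyRange (a : Int) (L.length : Int) 1).foldl (pvA_step d L) (book, count)).2 =
      pvLoopA d (L.getD (a - 1) 0) book count (L.drop a) := by
  induction hm : L.length - a using Nat.strong_induction_on generalizing a book count with
  | _ m ih =>
  cases m with
  | zero =>
    rw [PySem.List.pyRange_one_eq_nil (by omega), List.drop_eq_nil_of_le (by omega)]
    rfl
  | succ m =>
    have hal : a < L.length := by omega
    have hcast : ((a : Int)) - 1 = ((a - 1 : Nat) : Int) := by omega
    rw [PySem.List.pyRange_one_cons (by omega : (a : Int) < (L.length : Int))]
    simp only [List.foldl_cons]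
    have hstep : pvA_step d L (book, count) (a : Int) =
        (pvBump book (PySem.Int.mod (L.getD a 0) d),
         if PySem.Int.mod (L.getD a 0) d = PySem.Int.mod (L.getD (a - 1) 0) d
           then count + (PySem.List.pyGetD book (PySem.Int.mod (L.getD a 0) d) 0 - 1)
           else count + PySem.List.pyGetD book (PySem.Int.mod (L.getD a 0) d) 0) := by
      simp only [pvA_step, hcast, PySem.List.pyGetD_natCast, pvBump]
      have hne : ((a : Int) ≠ 0) = True := by simp; omega
      simp [hne]
    rw [hstep]
    rw [show ((a : Int) + 1) = (((a + 1 : Nat)) : Int) by omega,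
      ih m (by omega) (a + 1) (by omega) _ _ (by omega)]
    rw [List.drop_eq_getElem_cons hal]
    simp only [pvLoopA, Nat.add_sub_cancel]
    rw [List.getD_eq_getElem L 0 hal]

-- incrementing one in-range counter adds its old value to the pair sum
lemma pv_F_succ (v : Int) : pvF (v + 1) = pvF v + v := by
  simp only [pvF, PySem.Int.floordiv_eq_ediv_of_pos (by norm_num : (0:Int) < 2)]
  rw [show (v + 1) * (v + 1 - 1) = v * (v - 1) + v * 2 by ring,
    Int.add_mul_ediv_right _ _ (by norm_num : (2:Int) ≠ 0)]

lemma pv_pairsum_set (l : List Int) (k : Nat) (hk : k < l.length) :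
    pvPairsum (l.set k (l.getD k 0 + 1)) = pvPairsum l + l.getD k 0 := by
  induction l generalizing k with
  | nil => simp at hk
  | cons a t ih =>
    cases k with
    | zero => simp [pvPairsum, pv_F_succ]; ring
    | succ k =>
      simp only [List.set_cons_succ, List.getD_cons_succ, pvPairsum, List.map_cons, List.sum_cons]
      rw [show ((t.set k (t.getD k 0 + 1)).map pvF).sum = pvPairsum (t.set k (t.getD k 0 + 1)) from rfl,
        ih k (by simpa using hk)]
      simp [pvPairsum]; ring

lemma pv_pairsum_bump (l : List Int) (r : Int) (h0 : 0 ≤ r) (h1 : r < l.length) :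
    pvPairsum (pvBump l r) = pvPairsum l + PySem.List.pyGetD l r 0 := by
  have hr : r = ((r.toNat : Nat) : Int) := by omega
  rw [pvBump, hr, PySem.List.pySetD_natCast, PySem.List.pyGetD_natCast]
  exact pv_pairsum_set l r.toNat (by omega)

lemma pv_length_bump (l : List Int) (r : Int) : (pvBump l r).length = l.length := by
  simp [pvBump, PySem.List.length_pySetD]

-- the invariant of A's main loop
lemma pv_loopA_eq (d : Int) (hd : 0 < d) (ps : List Int) (prev : Int) (book : List Int)
    (count : Int) (hb : book.length = d.toNat) :
    pvLoopA d prev book count ps =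
      count + pvPairsum (ps.foldl (fun b p => pvBump b (PySem.Int.mod p d)) book)
        - pvPairsum book - pvAdjEq d prev ps := by
  induction ps generalizing prev book count with
  | nil => simp [pvLoopA, pvAdjEq]
  | cons p ps ih =>
    have hd0 : (0:Int) ≤ PySem.Int.mod p d := by
      rw [PySem.Int.mod_eq_emod_of_pos hd]; exact Int.emod_nonneg p (by omega)
    have hd1 : PySem.Int.mod p d < (book.length : Int) := by
      rw [PySem.Int.mod_eq_emod_of_pos hd]
      have := Int.emod_lt_of_pos p hd
      omega
    simp only [pvLoopA, pvAdjEq, List.foldl_cons]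
    rw [ih p _ _ (by rw [pv_length_bump]; exact hb)]
    rw [pv_pairsum_bump book _ hd0 hd1]
    split_ifs <;> ring

-- B's main loop, characterised
lemma pv_foldB_eq (d : Int) (A : List Int) (pref : Int) (freq : List Int) (e : Int) :
    A.foldl (pvB_step d) (pref, freq, e) =
      (pref + A.sum,
       (pvPsums pref A).foldl (fun b p => pvBump b (PySem.Int.mod p d)) freq,
       e + pvDivCnt d A) := by
  induction A generalizing pref freq e with
  | nil => simp [pvDivCnt, pvPsums]
  | cons x xs ih =>
    simp only [List.foldl_cons, List.sum_cons, pvPsums, pvDivCnt]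
    rw [show pvB_step d (pref, freq, e) x =
        (pref + x, pvBump freq (PySem.Int.mod (pref + x) d),
         e + if PySem.Int.mod x d = 0 then 1 else 0) from by
      simp [pvB_step, pvBump]; split <;> simp, ih]
    simp [add_assoc]

lemma pv_mod_add_left (d q x : Int) (hd : 0 < d) :
    (PySem.Int.mod (q + x) d = PySem.Int.mod q d) = (PySem.Int.mod x d = 0) := by
  simp only [PySem.Int.mod_eq_emod_of_pos hd]
  apply propext
  constructor
  · intro h
    have := Int.emod_eq_emod_iff_emod_sub_eq_zero.mp h
    simpa using this
  · intro h
    have : (q + x - q) % d = 0 := by simpa using h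
    exact Int.emod_eq_emod_iff_emod_sub_eq_zero.mpr this

-- consecutive prefix sums have equal remainders exactly on elements divisible by d
lemma pv_adjEq_eq_divCnt (d : Int) (hd : 0 < d) (A : List Int) (q : Int) :
    pvAdjEq d q (pvPsums q A) = pvDivCnt d A := by
  induction A generalizing q with
  | nil => rfl
  | cons x xs ih =>
    simp only [pvPsums, pvAdjEq, pvDivCnt, ih (q + x)]
    congr 1
    simp only [pv_mod_add_left d q x hd]

lemma pv_F_zero : pvF 0 = 0 := by decide

lemma pv_pairsum_replicate (k : Nat) : pvPairsum (List.replicate k (0 : Int)) = 0 := by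
  simp [pvPairsum, List.map_replicate, pv_F_zero]

lemma pv_getD_book0_zero (d : Int) :
    PySem.List.pyGetD (List.replicate d.toNat (0 : Int)) (0 : Int) 0 = 0 := by
  cases h : d.toNat with
  | zero => rfl
  | succ n => simp [List.replicate_succ, PySem.List.pyGetD_zero_cons]

lemma pv_A_side (A : List Int) (d : Int) (hd : 0 < d) :
    search_without_asterisk A d
      = pvPairsum ((pvPsums 0 A).foldl (fun b p => pvBump b (PySem.Int.mod p d))
          (pvBump (List.replicate d.toNat (0 : Int)) 0))
        - pvDivCnt d A := by
  have hm0 : PySem.Int.mod 0 d = 0 := by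
    rw [PySem.Int.mod_eq_emod_of_pos hd]; simp
  have hL := pvA_sumLst_eq A
  simp only [search_without_asterisk, hL]
  have hlen : (((0 :: pvPsums 0 A).length : Nat) : Int) = ((A.length + 1 : Nat) : Int) := by
    simp [pv_length_psums]
  rw [hlen, PySem.List.pyRange_one_cons (by omega)]
  simp only [List.foldl_cons]
  have hstep1 : pvA_step d (0 :: pvPsums 0 A) (List.replicate d.toNat (0 : Int), 0) 0
      = (pvBump (List.replicate d.toNat (0 : Int)) 0, 0) := by
    simp only [pvA_step, PySem.List.pyGetD_zero_cons, hm0, pvBump]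
    simp [pv_getD_book0_zero d]
  rw [hstep1]
  have h2 := pv_fold_eq_loopA d (0 :: pvPsums 0 A) 1 (le_refl 1)
    (pvBump (List.replicate d.toNat (0 : Int)) 0) 0
  rw [hlen] at h2
  rw [show ((0 : Int) + 1) = ((1 : Nat) : Int) by norm_num, h2]
  norm_num
  rw [pv_loopA_eq d hd _ 0 _ 0
    (by rw [pv_length_bump]; simp)]
  rw [pv_pairsum_bump _ 0 (by norm_num) (by simp; omega)]
  rw [pv_pairsum_replicate, pv_getD_book0_zero d, pv_adjEq_eq_divCnt d hd A 0]
  ring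

lemma pv_B_side (A : List Int) (d : Int) (hd : 0 < d) :
    search_without_asterisk_alt A d
      = pvPairsum ((pvPsums 0 A).foldl (fun b p => pvBump b (PySem.Int.mod p d))
          (pvBump (List.replicate d.toNat (0 : Int)) 0))
        - pvDivCnt d A := by
  have hm0 : PySem.Int.mod 0 d = 0 := by
    rw [PySem.Int.mod_eq_emod_of_pos hd]; simp
  simp only [search_without_asterisk_alt, hm0]
  rw [show PySem.List.pySetD (List.replicate d.toNat (0 : Int)) (0 : Int)
      (PySem.List.pyGetD (List.replicate d.toNat (0 : Int)) (0 : Int) 0 + 1)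
      = pvBump (List.replicate d.toNat (0 : Int)) 0 from rfl]
  rw [pv_foldB_eq d A 0 (pvBump (List.replicate d.toNat (0 : Int)) 0) 0]
  rw [show (fun (acc c : Int) => acc + PySem.Int.floordiv (c * (c - 1)) 2)
      = (fun (acc c : Int) => acc + pvF c) from rfl, PySem.List.foldl_add]
  simp [pvPairsum]

-- ===== VERDICT (by name: the statement is the Claim_ definition above) =====
theorem search_without_asterisk_spec : Claim_equal_search_without_asterisk := by
  intro A d _ hd
  unfold Spec_search_without_asterisk
  rw [pv_A_side A d hd, pv_B_side A d hd]
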